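-- pv_equiv track=rewrite | github.com/gcheng9430/InterviewPrep | Guo/28.py | maxSumOfStock
-- ===== SOURCE A (Python) =====
-- def maxSumOfStock(stockPrice,k):
--     #intuition: using a sliding window with two pointers, for each
--     #element we add to the window, shrink the window until all elmenet
--     #are distinct
--     #update maximum price sum if length of the window is k
--     #runtime: O(N)
--     #space: O(N)
--     if not stockPrice or k<=0:
--         return -1
--     left = 0
--     right = 0
--     windowSum=0
--     globalMax = 0
--     window = set()
--     while right<len(stockPrice):
--         #extend window by one
--         curr = stockPrice[right]
--         windowSum += curr
--         #shrink window when there are duplicates or window too long to meet requirement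
--         while curr in window or (right-left+1)>k:
--             leftCurr = stockPrice[left]
--             left+=1
--             window.remove(leftCurr)
--             windowSum-=leftCurr
--         #update max when window length is k
--         if right-left+1==k:
--             globalMax=max(globalMax,windowSum)
--         window.add(curr)
--         right+=1
--     return globalMax if globalMax!=0 else -1
-- ===== SOURCE B (Python) =====
-- def maxSumOfStock(stockPrice, k):
--     # Direct scan of every k-length window, keeping only the all-distinct ones.
--     if not stockPrice or k <= 0:
--         return -1
--     best = 0
--     for i in range(len(stockPrice) - k + 1):
--         w = stockPrice[i:i + k]
--         if len(set(w)) == k: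
--             best = max(best, sum(w))
--     return best if best != 0 else -1
-- ===== Notes on version B (the rewrite author's own statement) =====
-- stated objective: simpler
-- what changed: Replaces the sliding window (two pointers, shrink-while loop, running set and running sum) by a direct scan that checks every k-length slice for distinctness and takes the best sum.
import Mathlib
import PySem

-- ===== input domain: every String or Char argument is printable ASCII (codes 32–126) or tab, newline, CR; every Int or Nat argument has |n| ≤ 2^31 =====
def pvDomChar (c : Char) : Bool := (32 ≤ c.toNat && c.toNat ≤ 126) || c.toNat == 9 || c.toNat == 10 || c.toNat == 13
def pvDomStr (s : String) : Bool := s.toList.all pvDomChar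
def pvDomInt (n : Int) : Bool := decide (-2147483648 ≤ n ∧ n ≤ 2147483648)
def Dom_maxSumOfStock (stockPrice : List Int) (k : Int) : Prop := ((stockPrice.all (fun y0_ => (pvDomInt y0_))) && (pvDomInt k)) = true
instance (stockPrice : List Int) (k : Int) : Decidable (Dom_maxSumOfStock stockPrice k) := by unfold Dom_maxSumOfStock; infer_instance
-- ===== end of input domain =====

-- B replaces A's sliding window (two pointers + shrink loop + running set and sum) by a
-- direct scan of every k-length slice, keeping only the all-distinct ones (objective: simpler).

-- ===== PORT A =====
-- inner loop 'while curr in window or (right-left+1)>k': each step moves left up by one;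
-- fuel = right - left bounds its iterations (the window holds exactly right-left elements)
def pvShrink (stockPrice : List Int) (k : Int) (right : Nat) (curr : Int) :
    Nat → Nat → Int → PySem.Set Int → Nat × Int × PySem.Set Int
  | 0, left, wsum, window => (left, wsum, window)
  | fuel+1, left, wsum, window =>
    if PySem.Set.contains window curr ∨ ((right : Int) - (left : Int) + 1 > k) then
      -- stockPrice[left]: in range on every reached state; set.remove: the element is present
      let leftCurr := (PySem.List.pyGet? stockPrice (left : Int)).getD 0
      pvShrink stockPrice k right curr fuel (left+1) (wsum - leftCurr)
        ((PySem.Set.remove? window leftCurr).getD window)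
    else (left, wsum, window)

-- outer loop 'while right < len(stockPrice)'; fuel = len(stockPrice) - right
def pvOuter (stockPrice : List Int) (k : Int) :
    Nat → Nat → Nat → Int → Int → PySem.Set Int → Int
  | 0, _right, _left, _wsum, gm, _window => gm
  | fuel+1, right, left, wsum, gm, window =>
    if (right : Int) < (stockPrice.length : Int) then
      let curr := (PySem.List.pyGet? stockPrice (right : Int)).getD 0
      let s := pvShrink stockPrice k right curr (right - left) left (wsum + curr) window
      let gm' := if (right : Int) - (s.1 : Int) + 1 = k then max gm s.2.1 else gm
      pvOuter stockPrice k fuel (right+1) s.1 s.2.1 gm' (PySem.Set.add s.2.2 curr)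
    else gm

def maxSumOfStock (stockPrice : List Int) (k : Int) : Int :=
  if stockPrice = [] ∨ k ≤ 0 then -1
  else
    let gm := pvOuter stockPrice k stockPrice.length 0 0 0 0 PySem.Set.empty
    if gm ≠ 0 then gm else -1

-- ===== PORT B =====
-- body of B's for-loop: the slice stockPrice[i:i+k] counts iff its elements are distinct
def pvBStep (stockPrice : List Int) (k : Int) (best : Int) (i : Int) : Int :=
  let w := PySem.List.slice stockPrice (some i) (some (i + k))
  if ((PySem.Set.ofList w).length : Int) = k then max best w.sum else best

def maxSumOfStock_alt (stockPrice : List Int) (k : Int) : Int :=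
  if stockPrice = [] ∨ k ≤ 0 then -1
  else
    let best := (PySem.List.pyRange 0 ((stockPrice.length : Int) - k + 1) 1).foldl
      (pvBStep stockPrice k) 0
    if best ≠ 0 then best else -1

-- ===== PRECONDITION & SPEC =====
def Spec_maxSumOfStock (stockPrice : List Int) (k : Int) (out : Int) : Prop := out = maxSumOfStock_alt stockPrice k
instance (stockPrice : List Int) (k : Int) (out : Int) : Decidable (Spec_maxSumOfStock stockPrice k out) := by unfold Spec_maxSumOfStock; infer_instance

-- ===== CLAIM (what is proved, stated in full; the proofs are below) =====
def Claim_equal_maxSumOfStock : Prop := ∀ (stockPrice : List Int) (k : Int), Dom_maxSumOfStock stockPrice k → Spec_maxSumOfStock stockPrice k (maxSumOfStock stockPrice k)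

-- ===== LEMMAS AND PROOFS =====

-- the segment of indices [l, r) of sp
def pvSeg (sp : List Int) (l r : Nat) : List Int := (sp.drop l).take (r - l)

-- reference step: fold over window end positions r, counting the k-window ending at r
def pvStep (sp : List Int) (k' : Nat) (acc : Int) (r : Nat) : Int :=
  if k' ≤ r + 1 ∧ (pvSeg sp (r+1-k') (r+1)).Nodup then max acc (pvSeg sp (r+1-k') (r+1)).sum else acc

theorem pvSeg_nil (sp : List Int) (l : Nat) : pvSeg sp l l = [] := by
  simp [pvSeg]

theorem pvSeg_succ (sp : List Int) (l r : Nat) (hl : l ≤ r) (hr : r < sp.length) :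
    pvSeg sp l (r+1) = pvSeg sp l r ++ [sp[r]] := by
  unfold pvSeg
  have h1 : r + 1 - l = (r - l) + 1 := by omega
  rw [h1, List.take_add_one, List.getElem?_drop]
  have h2 : l + (r - l) = r := by omega
  rw [h2, List.getElem?_eq_getElem hr]
  rfl

theorem pvSeg_cons (sp : List Int) (l r : Nat) (hl : l < r) (hln : l < sp.length) :
    pvSeg sp l r = sp[l] :: pvSeg sp (l+1) r := by
  unfold pvSeg
  rw [List.drop_eq_getElem_cons hln]
  have h1 : r - l = (r - (l+1)) + 1 := by omega
  rw [h1, List.take_succ_cons]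

theorem pvNotMemConcat {xs : List Int} {a : Int} (h : (xs ++ [a]).Nodup) : a ∉ xs := by
  rw [List.nodup_append] at h
  intro hm
  exact (h.2.2 a hm a (by simp)) rfl

theorem pvOfListLength (xs : List Int) :
    (PySem.Set.ofList xs).length = xs.length ↔ xs.Nodup := by
  constructor
  · intro h
    have hnd := PySem.Set.nodup_ofList xs
    have hts : (PySem.Set.ofList xs).toFinset = xs.toFinset := by
      ext a
      simp [List.mem_toFinset, PySem.Set.mem_ofList]
    have h1 : (PySem.Set.ofList xs).toFinset.card = (PySem.Set.ofList xs).length := by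
      rw [List.card_toFinset, List.dedup_eq_self.mpr hnd]
    have h2 : xs.toFinset.card = xs.dedup.length := List.card_toFinset xs
    have h3 : xs.dedup.length = xs.length := by rw [hts] at h1; omega
    exact List.dedup_eq_self.mp ((xs.dedup_sublist).eq_of_length h3)
  · intro h
    rw [PySem.Set.ofList_eq_self_of_nodup xs h]

theorem pvNoop (sp : List Int) (k' : Nat) :
    ∀ (l : List Nat) (acc : Int), (∀ r ∈ l, r + 1 < k') →
    List.foldl (pvStep sp k') acc l = acc := by
  intro l
  induction l with
  | nil => intro acc _; rfl
  | cons x t ih =>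
    intro acc h
    have hx : ¬(k' ≤ x + 1 ∧ (pvSeg sp (x+1-k') (x+1)).Nodup) := by
      intro hc
      have := h x (by simp)
      omega
    simp only [List.foldl_cons]
    rw [show pvStep sp k' acc x = acc from by unfold pvStep; rw [if_neg hx]]
    exact ih acc (fun r hr => h r (by simp [hr]))

theorem pvShrink_spec (sp : List Int) (k : Int) (right : Nat) (curr : Int)
    (hk : 1 ≤ k) (hr : right < sp.length) (hcurr : curr = sp[right]) :
    ∀ (fuel left : Nat) (wsum : Int) (window : PySem.Set Int),
    fuel = right - left → left ≤ right →
    window = pvSeg sp left right → (pvSeg sp left right).Nodup →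
    wsum = (pvSeg sp left (right+1)).sum →
    (∀ l, l < left → ¬((pvSeg sp l (right+1)).Nodup ∧ (right:Int) - l + 1 ≤ k)) →
    ∃ L, pvShrink sp k right curr fuel left wsum window
        = (L, (pvSeg sp L (right+1)).sum, pvSeg sp L right)
      ∧ left ≤ L ∧ L ≤ right
      ∧ (pvSeg sp L (right+1)).Nodup
      ∧ (right:Int) - L + 1 ≤ k
      ∧ (∀ l, l < L → ¬((pvSeg sp l (right+1)).Nodup ∧ (right:Int) - l + 1 ≤ k)) := by
  intro fuel
  induction fuel with
  | zero =>
    intro left wsum window hfuel hlr hw hnd hsum hmin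
    have hEq : left = right := by omega
    subst hEq
    refine ⟨left, ?_, le_refl _, le_refl _, ?_, by omega, hmin⟩
    · simp [pvShrink, hw, hsum]
    · rw [pvSeg_succ sp left left (le_refl _) hr]
      simp [pvSeg_nil]
  | succ fuel ih =>
    intro left wsum window hfuel hlr hw hnd hsum hmin
    have hlt : left < right := by omega
    have hln : left < sp.length := by omega
    simp only [pvShrink]
    by_cases hC : (PySem.Set.contains window curr = true) ∨ ((right : Int) - (left : Int) + 1 > k)
    · rw [if_pos hC]
      have hget : (PySem.List.pyGet? sp (left : Int)).getD 0 = sp[left] := by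
        rw [PySem.List.pyGet?_natCast, List.getElem?_eq_getElem hln]
        rfl
      have hwc : window = sp[left] :: pvSeg sp (left+1) right := by
        rw [hw, pvSeg_cons sp left right hlt hln]
      have hndc : (sp[left] :: pvSeg sp (left+1) right).Nodup := by
        rw [pvSeg_cons sp left right hlt hln] at hnd; exact hnd
      have hndt : (pvSeg sp (left+1) right).Nodup := (List.nodup_cons.mp hndc).2
      have hhead : sp[left] ∉ pvSeg sp (left+1) right := (List.nodup_cons.mp hndc).1
      have hrem : (PySem.Set.remove? window ((PySem.List.pyGet? sp (left:Int)).getD 0)).getD window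
          = pvSeg sp (left+1) right := by
        rw [hget, hwc]
        unfold PySem.Set.remove? PySem.Set.discard PySem.Set.contains
        rw [if_pos (by simp)]
        simp only [Option.getD_some]
        rw [List.filter_cons]
        simp only [beq_self_eq_true, Bool.not_true]
        rw [if_neg (by simp)]
        exact List.filter_eq_self.mpr (fun y hy => by
          simp only [Bool.not_eq_true', beq_eq_false_iff_ne, ne_eq]
          intro hEq
          exact hhead (hEq ▸ hy))
      have hsum2 : wsum - (PySem.List.pyGet? sp (left:Int)).getD 0
          = (pvSeg sp (left+1) (right+1)).sum := by
        rw [hget, hsum, pvSeg_cons sp left (right+1) (by omega) hln]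
        simp [List.sum_cons]
      have hmin2 : ∀ l, l < left + 1 → ¬((pvSeg sp l (right+1)).Nodup ∧ (right:Int) - l + 1 ≤ k) := by
        intro l hl
        rcases Nat.lt_or_ge l left with h | h
        · exact hmin l h
        · have hEq : l = left := by omega
          subst hEq
          rintro ⟨hn1, hle1⟩
          rcases hC with hc | hc
          · have hmem : curr ∈ pvSeg sp l right := by
              rw [← hw]
              exact List.contains_iff_mem.mp hc
            rw [pvSeg_succ sp l right (by omega) hr, ← hcurr] at hn1
            exact absurd hmem (pvNotMemConcat hn1)
          · omega
      obtain ⟨L, hres, hL1, hL2, hL3, hL4, hL5⟩ :=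
        ih (left+1) (wsum - (PySem.List.pyGet? sp (left:Int)).getD 0)
           ((PySem.Set.remove? window ((PySem.List.pyGet? sp (left:Int)).getD 0)).getD window)
           (by omega) (by omega) hrem hndt hsum2 hmin2
      exact ⟨L, hres, by omega, hL2, hL3, hL4, hL5⟩
    · rw [if_neg hC]
      have hc1 : ¬(PySem.Set.contains window curr = true) := fun h => hC (Or.inl h)
      have hc2 : ¬((right : Int) - (left : Int) + 1 > k) := fun h => hC (Or.inr h)
      have hmem : curr ∉ pvSeg sp left right := by
        rw [← hw]
        intro hm
        exact hc1 (List.contains_iff_mem.mpr hm)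
      refine ⟨left, by simp [hw, hsum], le_refl _, hlr, ?_, by omega, hmin⟩
      rw [pvSeg_succ sp left right hlr hr, ← hcurr, List.nodup_append]
      refine ⟨hnd, List.nodup_singleton _, fun a ha b hb => ?_⟩
      simp only [List.mem_singleton] at hb
      subst hb
      intro hEq
      exact hmem (hEq ▸ ha)

theorem pvOuter_spec (sp : List Int) (k : Int) (hk : 1 ≤ k) :
    ∀ (fuel right left : Nat) (wsum gm : Int) (window : PySem.Set Int),
    fuel + right = sp.length → left ≤ right →
    window = pvSeg sp left right → (pvSeg sp left right).Nodup →
    wsum = (pvSeg sp left right).sum →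
    (right:Int) - left ≤ k →
    (∀ l, l < left → ¬((pvSeg sp l right).Nodup ∧ (right:Int) - l ≤ k)) →
    pvOuter sp k fuel right left wsum gm window
      = (List.range' right fuel).foldl (pvStep sp k.toNat) gm := by
  intro fuel
  induction fuel with
  | zero =>
    intro right left wsum gm window _ _ _ _ _ _ _
    simp [pvOuter]
  | succ fuel ih =>
    intro right left wsum gm window hfuel hlr hw hnd hsum hlen hmin
    have hrn : right < sp.length := by omega
    have hkt : (k.toNat : Int) = k := Int.toNat_of_nonneg (by omega)
    simp only [pvOuter]
    rw [if_pos (by exact_mod_cast hrn)]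
    have hget : (PySem.List.pyGet? sp (right : Int)).getD 0 = sp[right] := by
      rw [PySem.List.pyGet?_natCast, List.getElem?_eq_getElem hrn]
      rfl
    obtain ⟨L, hres, hL1, hL2, hL3, hL4, hL5⟩ :=
      pvShrink_spec sp k right ((PySem.List.pyGet? sp (right:Int)).getD 0) hk hrn hget
        (right - left) left (wsum + (PySem.List.pyGet? sp (right:Int)).getD 0) window
        rfl hlr hw hnd
        (by rw [hget, hsum, pvSeg_succ sp left right hlr hrn]; simp)
        (by
          intro l hl
          rintro ⟨hn1, hle1⟩
          refine hmin l hl ⟨?_, by omega⟩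
          rw [pvSeg_succ sp l right (by omega) hrn] at hn1
          exact hn1.of_append_left)
    rw [hres]
    have hnotin : sp[right] ∉ pvSeg sp L right := by
      have h := hL3
      rw [pvSeg_succ sp L right hL2 hrn] at h
      exact pvNotMemConcat h
    have hadd : PySem.Set.add (pvSeg sp L right) ((PySem.List.pyGet? sp (right:Int)).getD 0)
        = pvSeg sp L (right+1) := by
      rw [hget]
      unfold PySem.Set.add PySem.Set.contains
      rw [if_neg (by simp only [List.contains_iff_mem]; exact hnotin)]
      rw [← pvSeg_succ sp L right hL2 hrn]
    have hgm : (if (right:Int) - (L:Int) + 1 = k then max gm (pvSeg sp L (right+1)).sum else gm)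
        = pvStep sp k.toNat gm right := by
      by_cases hc : (right:Int) - (L:Int) + 1 = k
      · have hLval : L = right + 1 - k.toNat := by omega
        have hcond : k.toNat ≤ right + 1 ∧ (pvSeg sp (right+1-k.toNat) (right+1)).Nodup :=
          ⟨by omega, by rw [← hLval]; exact hL3⟩
        rw [if_pos hc]
        unfold pvStep
        rw [if_pos hcond, hLval]
      · rw [if_neg hc]
        unfold pvStep
        rw [if_neg ?_]
        rintro ⟨h1, h2⟩
        have h3 : ¬ (right + 1 - k.toNat) < L := by
          intro hlt
          exact hL5 (right + 1 - k.toNat) hlt ⟨h2, by omega⟩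
        omega
    simp only [hadd, hgm]
    rw [ih (right+1) L ((pvSeg sp L (right+1)).sum) (pvStep sp k.toNat gm right)
          (pvSeg sp L (right+1)) (by omega) (by omega) rfl hL3 rfl (by omega)
          (by
            intro l hl
            rintro ⟨h1, h2⟩
            exact hL5 l hl ⟨h1, by omega⟩)]
    rw [List.range'_succ, List.foldl_cons]

theorem pvAlt_fold (sp : List Int) (k : Int) (hk : 1 ≤ k) :
    (PySem.List.pyRange 0 ((sp.length : Int) - k + 1) 1).foldl (pvBStep sp k) 0
      = (List.range sp.length).foldl (pvStep sp k.toNat) 0 := by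
  have hkt : (k.toNat : Int) = k := Int.toNat_of_nonneg (by omega)
  have hk1 : 1 ≤ k.toNat := by omega
  by_cases hnk : sp.length < k.toNat
  · have hempty : PySem.List.pyRange 0 ((sp.length : Int) - k + 1) 1 = [] := by
      unfold PySem.List.pyRange
      rw [if_neg (by norm_num), if_pos (by norm_num), if_neg (by omega)]
      simp
    rw [hempty]
    exact (pvNoop sp k.toNat (List.range sp.length) 0
      (fun r hr => by have := List.mem_range.mp hr; omega)).symm
  · rw [Nat.not_lt] at hnk
    have hrange : PySem.List.pyRange 0 ((sp.length : Int) - k + 1) 1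
        = (List.range (sp.length - k.toNat + 1)).map (fun i : Nat => (i : Int)) := by
      rw [show ((sp.length : Int) - k + 1) = ((sp.length - k.toNat + 1 : Nat) : Int) by push_cast; omega]
      exact PySem.List.pyRange_zero_natCast _
    rw [hrange, List.foldl_map]
    conv_rhs => rw [show sp.length = (k.toNat - 1) + (sp.length - k.toNat + 1) by omega,
      List.range_add, List.foldl_append]
    rw [pvNoop sp k.toNat (List.range (k.toNat - 1)) 0
      (fun r hr => by have := List.mem_range.mp hr; omega)]
    rw [List.foldl_map]
    apply PySem.List.foldl_congr_mem
    intro acc i hi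
    have him : i < sp.length - k.toNat + 1 := List.mem_range.mp hi
    simp only [pvBStep, pvStep]
    have hslice : PySem.List.slice sp (some (i:Int)) (some ((i:Int) + k)) = pvSeg sp i (i + k.toNat) := by
      rw [← hkt, PySem.List.slice_natCast_add sp i k.toNat]
      unfold pvSeg
      congr 1
      omega
    rw [hslice]
    have hwlen : (pvSeg sp i (i + k.toNat)).length = k.toNat := by
      unfold pvSeg
      rw [List.length_take, List.length_drop]
      omega
    rw [show k.toNat - 1 + i + 1 = i + k.toNat by omega,
        show i + k.toNat - k.toNat = i by omega]
    have hcond : (((PySem.Set.ofList (pvSeg sp i (i + k.toNat))).length : Int) = k)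
        ↔ (k.toNat ≤ i + k.toNat ∧ (pvSeg sp i (i+k.toNat)).Nodup) := by
      constructor
      · intro h
        refine ⟨by omega, ?_⟩
        apply (pvOfListLength _).mp
        rw [hwlen]
        omega
      · rintro ⟨_, hnd⟩
        rw [(pvOfListLength _).mpr hnd, hwlen, hkt]
    by_cases hc : ((PySem.Set.ofList (pvSeg sp i (i + k.toNat))).length : Int) = k
    · rw [if_pos hc, if_pos (hcond.mp hc)]
    · rw [if_neg hc, if_neg (fun hh => hc (hcond.mpr hh))]

-- ===== VERDICT (by name: the statement is the Claim_ definition above) =====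
theorem maxSumOfStock_spec : Claim_equal_maxSumOfStock := by
  intro sp k _
  unfold Spec_maxSumOfStock maxSumOfStock maxSumOfStock_alt
  by_cases hg : sp = [] ∨ k ≤ 0
  · rw [if_pos hg, if_pos hg]
  · have hne := not_or.mp hg
    have hk : 1 ≤ k := by omega
    rw [if_neg hg, if_neg hg]
    have hA := pvOuter_spec sp k hk sp.length 0 0 0 0 PySem.Set.empty
      (by omega) (le_refl 0) (by simp [pvSeg_nil, PySem.Set.empty]) (by simp [pvSeg_nil])
      (by simp [pvSeg_nil]) (by omega) (by omega)
    simp only [hA, pvAlt_fold sp k hk, List.range_eq_range']
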